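-- pv_equiv track=rewrite | github.com/Gerson2102/portafolio1 | invertirLista.py | invertirLista_aux
-- ===== SOURCE A (Python) =====
-- def invertirLista_aux (p_lista, p_resultado):
--     if p_lista == []:
--         return p_resultado
--     else:
--         if (p_lista [-1], int) and (p_lista [-1] >= 0):
--             return invertirLista_aux (p_lista [:-1], p_resultado + [p_lista [-1]])
--         else:
--             return invertirLista_aux (p_lista [:-1], p_resultado)
-- ===== SOURCE B (Python) =====
-- def invertirLista_aux(p_lista, p_resultado):
--     seleccionados = []
--     for x in p_lista:
--         if x >= 0:
--             seleccionados.append(x)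
--     return p_resultado + seleccionados[::-1]
-- ===== Notes on version B (the rewrite author's own statement) =====
-- stated objective: faster
-- what changed: Replaced A's back-to-front accumulator recursion over repeatedly copied [:-1] slices (with a vacuous always-truthy '(x, int)' tuple test) by a single forward collecting loop plus one final reverse.
import Mathlib
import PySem

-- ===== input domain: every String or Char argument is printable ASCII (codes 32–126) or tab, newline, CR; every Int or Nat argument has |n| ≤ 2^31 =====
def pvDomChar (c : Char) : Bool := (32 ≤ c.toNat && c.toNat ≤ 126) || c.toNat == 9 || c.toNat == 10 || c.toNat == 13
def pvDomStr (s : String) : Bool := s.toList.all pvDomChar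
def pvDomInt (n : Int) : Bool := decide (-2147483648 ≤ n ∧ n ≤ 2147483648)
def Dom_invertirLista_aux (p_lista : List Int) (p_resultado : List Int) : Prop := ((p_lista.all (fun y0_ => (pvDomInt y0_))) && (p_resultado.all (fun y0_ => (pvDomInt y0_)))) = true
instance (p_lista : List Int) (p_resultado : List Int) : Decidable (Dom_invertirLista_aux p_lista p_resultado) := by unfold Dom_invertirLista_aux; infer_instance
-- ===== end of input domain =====

-- B replaces A's back-to-front accumulator recursion over [:-1] slices by a forward
-- collecting pass plus one final reverse (simpler; A's '(x, int)' tuple test is always truthy).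


-- ===== PORT A =====
-- '(p_lista[-1], int)' is a nonempty tuple, always truthy in Python, so the
-- 'and' reduces to the right operand; ported as 'true && ...' to keep the shape.
-- The recursion on the [:-1] slice is driven by a fuel counter (= initial length),
-- a pure totality guard so the kernel can evaluate it; the fuel never runs out.
def invertirLista_auxGo (fuel : Nat) (p_lista : List Int) (p_resultado : List Int) : List Int :=
  if p_lista = [] then p_resultado
  else
    match fuel with
    | 0 => p_resultado  -- unreachable when fuel = p_lista.length
    | fuel + 1 =>
      if true && decide (0 ≤ PySem.List.pyGetD p_lista (-1) 0) then
        invertirLista_auxGo fuel (PySem.List.slice p_lista none (some (-1)))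
          (p_resultado ++ [PySem.List.pyGetD p_lista (-1) 0])
      else
        invertirLista_auxGo fuel (PySem.List.slice p_lista none (some (-1))) p_resultado

def invertirLista_aux (p_lista : List Int) (p_resultado : List Int) : List Int :=
  invertirLista_auxGo p_lista.length p_lista p_resultado

-- ===== PORT B =====
def invertirLista_aux_alt (p_lista : List Int) (p_resultado : List Int) : List Int :=
  let seleccionados :=
    p_lista.foldl (fun acc x => if 0 ≤ x then acc ++ [x] else acc) []
  p_resultado ++ seleccionados.reverse

-- ===== PRECONDITION & SPEC =====
def Spec_invertirLista_aux (p_lista : List Int) (p_resultado : List Int) (out : List Int) : Prop := out = invertirLista_aux_alt p_lista p_resultado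
instance (p_lista : List Int) (p_resultado : List Int) (out : List Int) : Decidable (Spec_invertirLista_aux p_lista p_resultado out) := by unfold Spec_invertirLista_aux; infer_instance

-- ===== CLAIM (what is proved, stated in full; the proofs are below) =====
def Claim_equal_invertirLista_aux : Prop := ∀ (p_lista : List Int) (p_resultado : List Int), Dom_invertirLista_aux p_lista p_resultado → Spec_invertirLista_aux p_lista p_resultado (invertirLista_aux p_lista p_resultado)

-- ===== LEMMAS AND PROOFS =====

theorem foldl_if_append (l : List Int) (acc : List Int) :
    l.foldl (fun acc x => if 0 ≤ x then acc ++ [x] else acc) acc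
      = acc ++ l.filter (fun x => decide (0 ≤ x)) := by
  induction l generalizing acc with
  | nil => simp
  | cons x xs ih =>
    simp only [List.foldl_cons, List.filter_cons, ih]
    split <;> simp_all

theorem invertirLista_auxGo_eq (fuel : Nat) (p_lista p_resultado : List Int)
    (h : p_lista.length ≤ fuel) :
    invertirLista_auxGo fuel p_lista p_resultado
      = p_resultado ++ (p_lista.filter (fun x => decide (0 ≤ x))).reverse := by
  induction fuel generalizing p_lista p_resultado with
  | zero =>
    have : p_lista = [] := List.eq_nil_of_length_eq_zero (Nat.le_zero.mp h)
    simp [invertirLista_auxGo, this]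
  | succ fuel ih =>
    by_cases hl : p_lista = []
    · simp [invertirLista_auxGo, hl]
    · obtain ⟨ys, y, rfl⟩ : ∃ ys y, p_lista = ys ++ [y] :=
        ⟨p_lista.dropLast, p_lista.getLast hl, (List.dropLast_append_getLast hl).symm⟩
      rw [invertirLista_auxGo]
      have hfuel : ys.length ≤ fuel := by simpa using h
      simp only [hl, if_false, PySem.List.pyGetD_neg_one_append_singleton,
        PySem.List.slice_to_neg_one, List.dropLast_concat, Bool.true_and]
      by_cases hy : (0 : Int) ≤ y
      · simp [hy, ih _ _ hfuel, List.filter_append]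
      · simp [hy, ih _ _ hfuel, List.filter_append]

theorem invertirLista_aux_eq (p_lista p_resultado : List Int) :
    invertirLista_aux p_lista p_resultado
      = p_resultado ++ (p_lista.filter (fun x => decide (0 ≤ x))).reverse :=
  invertirLista_auxGo_eq _ _ _ le_rfl

-- ===== VERDICT (by name: the statement is the Claim_ definition above) =====
theorem invertirLista_aux_spec : Claim_equal_invertirLista_aux := by
  intro p_lista p_resultado _
  unfold Spec_invertirLista_aux invertirLista_aux_alt
  rw [invertirLista_aux_eq, foldl_if_append]
  simp
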